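-- pv_equiv track=rewrite | github.com/kyj519/CombineFactory | python/draw_postfit_from_external_fit.py | _build_plot_groups
-- ===== SOURCE A (Python) =====
-- from typing import Dict, Iterable, List, Optional, Sequence, Tuple
--
-- def _build_plot_groups(states: Sequence[str]) -> Dict[str, List[str]]:
--     groups = {
--         "SR": sorted([state for state in states if state.startswith("Signal")]),
--         "SL": sorted(
--             [
--                 state
--                 for state in states
--                 if state.startswith("Control_") and not state.startswith("Control_DL_")
--             ]
--         ),
--         "DL": sorted([state for state in states if state.startswith("Control_DL_")]),
--     }
--     return groups
-- ===== SOURCE B (Python) =====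
-- def _build_plot_groups(states):
--     # Sort ONCE globally, then partition the already-sorted stream: a stable
--     # filter of a sorted list is sorted, so no per-group sort is needed.
--     sr, sl, dl = [], [], []
--     for state in sorted(states):
--         if state.startswith("Signal"):
--             sr.append(state)
--         elif state.startswith("Control_DL_"):
--             dl.append(state)
--         elif state.startswith("Control_"):
--             sl.append(state)
--     return {"SR": sr, "SL": sl, "DL": dl}
-- ===== Notes on version B (the rewrite author's own statement) =====
-- stated objective: alternative
-- what changed: Inverts A's partition-then-sort into sort-then-partition: the input is sorted once globally and a single dispatch loop over the sorted stream appends each state to its group, with no per-group sorts (correct because filtering a sorted list preserves sortedness).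
import Mathlib
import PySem

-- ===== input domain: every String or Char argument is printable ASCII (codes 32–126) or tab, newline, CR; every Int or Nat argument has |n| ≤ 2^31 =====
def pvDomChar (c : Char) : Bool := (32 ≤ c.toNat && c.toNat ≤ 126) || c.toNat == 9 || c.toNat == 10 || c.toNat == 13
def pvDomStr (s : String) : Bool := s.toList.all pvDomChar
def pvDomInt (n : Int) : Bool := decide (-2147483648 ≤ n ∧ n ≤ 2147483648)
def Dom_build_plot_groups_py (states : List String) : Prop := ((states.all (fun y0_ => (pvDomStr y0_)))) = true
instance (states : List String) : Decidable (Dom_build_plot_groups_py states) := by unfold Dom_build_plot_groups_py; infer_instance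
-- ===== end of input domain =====

-- B inverts A's partition-then-sort into sort-then-partition: one global sort, then one
-- dispatch pass over the sorted stream with no per-group sorts (objective: alternative).

-- ===== PORT A =====
def build_plot_groups_py (states : List String) : List (String × List String) :=
  [("SR", PySem.List.sorted (states.filter (fun state => PySem.Str.startswith state "Signal")) (fun x => x) false),
   ("SL", PySem.List.sorted (states.filter (fun state =>
        PySem.Str.startswith state "Control_" && !PySem.Str.startswith state "Control_DL_")) (fun x => x) false),
   ("DL", PySem.List.sorted (states.filter (fun state => PySem.Str.startswith state "Control_DL_")) (fun x => x) false)]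

-- ===== PORT B =====
def bpgStep (acc : List String × List String × List String) (state : String) :
    List String × List String × List String :=
  if PySem.Str.startswith state "Signal" then (acc.1 ++ [state], acc.2.1, acc.2.2)
  else if PySem.Str.startswith state "Control_DL_" then (acc.1, acc.2.1, acc.2.2 ++ [state])
  else if PySem.Str.startswith state "Control_" then (acc.1, acc.2.1 ++ [state], acc.2.2)
  else acc

def build_plot_groups_py_alt (states : List String) : List (String × List String) :=
  let acc := (PySem.List.sorted states (fun x => x) false).foldl bpgStep ([], [], [])
  [("SR", acc.1), ("SL", acc.2.1), ("DL", acc.2.2)]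

-- ===== PRECONDITION & SPEC =====
def Spec_build_plot_groups_py (states : List String) (out : List (String × List String)) : Prop := out = build_plot_groups_py_alt states
instance (states : List String) (out : List (String × List String)) : Decidable (Spec_build_plot_groups_py states out) := by unfold Spec_build_plot_groups_py; infer_instance

-- ===== CLAIM (what is proved, stated in full; the proofs are below) =====
def Claim_equal_build_plot_groups_py : Prop := ∀ (states : List String), Dom_build_plot_groups_py states → Spec_build_plot_groups_py states (build_plot_groups_py states)

-- ===== LEMMAS AND PROOFS =====

-- a string starting with "Signal" does not start with "Control_" (nor "Control_DL_")
theorem sig_not_ctrl (l : List Char) (h : PySem.Chars.startswith l ['S','i','g','n','a','l'] = true) :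
    PySem.Chars.startswith l ['C','o','n','t','r','o','l','_'] = false := by
  rw [PySem.Chars.startswith_iff] at h
  by_contra hc
  rw [Bool.not_eq_false, PySem.Chars.startswith_iff] at hc
  obtain ⟨t1, ht1⟩ := h
  obtain ⟨t2, ht2⟩ := hc
  rw [← ht1] at ht2
  simp at ht2

theorem sig_not_dl (l : List Char) (h : PySem.Chars.startswith l ['S','i','g','n','a','l'] = true) :
    PySem.Chars.startswith l ['C','o','n','t','r','o','l','_','D','L','_'] = false := by
  rw [PySem.Chars.startswith_iff] at h
  by_contra hc
  rw [Bool.not_eq_false, PySem.Chars.startswith_iff] at hc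
  obtain ⟨t1, ht1⟩ := h
  obtain ⟨t2, ht2⟩ := hc
  rw [← ht1] at ht2
  simp at ht2

theorem dl_ctrl (l : List Char) (h : PySem.Chars.startswith l ['C','o','n','t','r','o','l','_','D','L','_'] = true) :
    PySem.Chars.startswith l ['C','o','n','t','r','o','l','_'] = true := by
  rw [PySem.Chars.startswith_iff] at h ⊢
  exact List.IsPrefix.trans (by decide) h

-- the dispatch fold computes the three prefix filters of its input, in order
theorem bpg_foldl (states : List String) (a b c : List String) :
    states.foldl bpgStep (a, b, c) =
      (a ++ states.filter (fun s => PySem.Str.startswith s "Signal"),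
       b ++ states.filter (fun s =>
          PySem.Str.startswith s "Control_" && !PySem.Str.startswith s "Control_DL_"),
       c ++ states.filter (fun s => PySem.Str.startswith s "Control_DL_")) := by
  induction states generalizing a b c with
  | nil => simp
  | cons s t ih =>
    simp only [List.foldl_cons, List.filter_cons, bpgStep]
    by_cases h1 : PySem.Chars.startswith s.toList ['S','i','g','n','a','l'] = true
    · simp [h1, sig_not_ctrl s.toList h1, sig_not_dl s.toList h1, ih]
    · rw [Bool.not_eq_true] at h1
      by_cases h2 : PySem.Chars.startswith s.toList ['C','o','n','t','r','o','l','_','D','L','_'] = true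
      · simp [h1, h2, dl_ctrl s.toList h2, ih]
      · rw [Bool.not_eq_true] at h2
        by_cases h3 : PySem.Chars.startswith s.toList ['C','o','n','t','r','o','l','_'] = true
        · simp [h1, h2, h3, ih]
        · rw [Bool.not_eq_true] at h3
          simp [h1, h2, h3, ih]

-- sorting then filtering equals filtering then sorting (identity key)
theorem filter_sorted (p : String → Bool) (xs : List String) :
    PySem.List.sorted (xs.filter p) (fun x => x) false
      = (PySem.List.sorted xs (fun x => x) false).filter p := by
  apply PySem.List.sorted_id_eq_of_perm_of_pairwise
  · exact (PySem.List.sorted_perm xs (fun x => x) false).filter p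
  · exact (PySem.List.sorted_pairwise xs (fun x => x)).filter p

-- ===== VERDICT (by name: the statement is the Claim_ definition above) =====
theorem build_plot_groups_py_spec : Claim_equal_build_plot_groups_py := by
  intro states _
  unfold Spec_build_plot_groups_py build_plot_groups_py build_plot_groups_py_alt
  rw [bpg_foldl]
  simp [filter_sorted]
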